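-- pv_equiv track=rewrite | github.com/sooheng/pyX | lyq.py | secEncode
-- ===== SOURCE A (Python) =====
-- def secEncode(a, b="RDpbLfCPsJZ7fiv", c="yLwVl0zKqws7LgKPRQ84Mdt708T1qQ3Ha7xv3H7NyU84p21BriUWBU43odz3iP4rBL3cD02KZciXTysVXiV8ngg6vL48rPJyAUw0HurW20xqxv9aYb4M9wK1Ae0wlro510qXeU07kV57fQMc8L6aLgMLwygtc0F10a0Dg70TOoouyFhdysuRMO51yY5ZlOZZLEal1h0t9YQW0Ko7oBwmCAHoic4HYbUyVeU3sfQ1xtXcPcf1aT303wAQhv66qzW"):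
--     '''路由器认证加密函数'''
--     d = ''; k = 187; l = 187; f = len(a); h = len(b); m = len(c)
--     if f > h:
--         e = f
--     else:
--         e = h
--     for g in range(e):
--         l = k = 187
--         if g >= f:
--             l = ord(b[g])
--         elif g >= h:
--             k = ord(a[g])
--         else:
--             k = ord(a[g])
--             l = ord(b[g])
--         d = d + c[(k^l) % m]
--     return d
-- ===== SOURCE B (Python) =====
-- def secEncode(a, b="RDpbLfCPsJZ7fiv", c="yLwVl0zKqws7LgKPRQ84Mdt708T1qQ3Ha7xv3H7NyU84p21BriUWBU43odz3iP4rBL3cD02KZciXTysVXiV8ngg6vL48rPJyAUw0HurW20xqxv9aYb4M9wK1Ae0wlro510qXeU07kV57fQMc8L6aLgMLwygtc0F10a0Dg70TOoouyFhdysuRMO51yY5ZlOZZLEal1h0t9YQW0Ko7oBwmCAHoic4HYbUyVeU3sfQ1xtXcPcf1aT303wAQhv66qzW"):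
--     '''路由器认证加密函数 — prefix/tail segment decomposition'''
--     m = len(c)
--     head = ''.join(c[(ord(x) ^ ord(y)) % m] for x, y in zip(a, b))
--     tail_src = a[len(b):] if len(a) > len(b) else b[len(a):]
--     tail = ''.join(c[(ord(x) ^ 187) % m] for x in tail_src)
--     return head + tail
-- ===== Notes on version B (the rewrite author's own statement) =====
-- stated objective: alternative
-- what changed: Replaces A's single index loop over range(max(len(a),len(b))) with per-step three-way bounds branching by a two-segment decomposition: encode the overlapping prefix via zip(a,b), then separately encode the leftover tail of the longer string XORed with the constant 187, and concatenate.
import Mathlib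
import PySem

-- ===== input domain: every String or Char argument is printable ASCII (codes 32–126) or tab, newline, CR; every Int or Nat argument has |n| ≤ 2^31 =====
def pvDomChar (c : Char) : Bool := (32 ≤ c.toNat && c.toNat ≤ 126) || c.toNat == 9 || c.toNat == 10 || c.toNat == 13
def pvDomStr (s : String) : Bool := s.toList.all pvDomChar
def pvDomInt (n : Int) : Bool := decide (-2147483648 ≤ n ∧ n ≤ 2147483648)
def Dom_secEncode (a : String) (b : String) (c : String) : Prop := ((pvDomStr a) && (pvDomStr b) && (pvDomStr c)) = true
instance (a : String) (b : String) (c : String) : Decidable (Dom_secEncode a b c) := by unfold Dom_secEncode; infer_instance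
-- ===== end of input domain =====

-- B replaces A's single index loop with per-step bounds branching by a two-segment
-- decomposition: encode the zip(a,b) prefix, then the leftover tail XOR 187 (alternative; same cost).

-- ===== PORT A =====
-- literal port of A: index loop over range(max(f,h)) with the three-way branch,
-- appending one char of c per step to the accumulator d
def secEncode (a : String) (b : String) (c : String) : String :=
  let la := a.toList
  let lb := b.toList
  let lc := c.toList
  let f := la.length
  let h := lb.length
  let m := lc.length
  let e := if f > h then f else h
  String.mk ((List.range e).foldl (fun d g =>
    let kl : Nat × Nat :=
      if g ≥ f then (187, (lb.getD g ' ').toNat)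
      else if g ≥ h then ((la.getD g ' ').toNat, 187)
      else ((la.getD g ' ').toNat, (lb.getD g ' ').toNat)
    d ++ [lc.getD ((Nat.xor kl.1 kl.2) % m) ' ']) [])

-- ===== PORT B =====
-- port of B: encode the overlapping prefix over zip(a,b), then the tail of the
-- longer string XORed with the constant 187, and concatenate
def secEncode_alt (a : String) (b : String) (c : String) : String :=
  let lc := c.toList
  let m := lc.length
  let la := a.toList
  let lb := b.toList
  let head := (la.zip lb).map (fun xy => lc.getD ((Nat.xor xy.1.toNat xy.2.toNat) % m) ' ')
  let tailSrc := if la.length > lb.length then la.drop lb.length else lb.drop la.length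
  let tail := tailSrc.map (fun x => lc.getD ((Nat.xor x.toNat 187) % m) ' ')
  String.mk (head ++ tail)

-- ===== PRECONDITION & SPEC =====
-- Pre_ excludes exactly the inputs where the Python A raises ZeroDivisionError
-- (c empty while at least one of a, b is nonempty); B raises there too.
def Pre_secEncode (a : String) (b : String) (c : String) : Prop :=
  c ≠ "" ∨ (a = "" ∧ b = "")
instance (a : String) (b : String) (c : String) : Decidable (Pre_secEncode a b c) := by
  unfold Pre_secEncode; infer_instance
def pvWitness_secEncode : String × String × String := ("hi", "yo", "abc")

def Spec_secEncode (a : String) (b : String) (c : String) (out : String) : Prop := out = secEncode_alt a b c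
instance (a : String) (b : String) (c : String) (out : String) : Decidable (Spec_secEncode a b c out) := by unfold Spec_secEncode; infer_instance

-- ===== CLAIM (what is proved, stated in full; the proofs are below) =====
def Claim_equal_secEncode : Prop := ∀ (a : String) (b : String) (c : String), Dom_secEncode a b c → Pre_secEncode a b c → Spec_secEncode a b c (secEncode a b c)

-- ===== LEMMAS AND PROOFS =====

theorem foldl_app_map (L : List Nat) (init : List Char) (F : Nat → Char) :
    L.foldl (fun d g => d ++ [F g]) init = init ++ L.map F := by
  induction L generalizing init with
  | nil => simp
  | cons x xs ih => simp [List.foldl_cons, ih]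

theorem secEncode_lists (a b c : String) :
    secEncode a b c = secEncode_alt a b c := by
  unfold secEncode secEncode_alt
  simp only [foldl_app_map, List.nil_append]
  congr 1
  by_cases hgt : a.toList.length > b.toList.length
  · simp only [if_pos hgt]
    apply List.ext_getElem
    · simp only [List.length_map, List.length_range, List.length_append, List.length_zip,
        List.length_drop]
      omega
    · intro i h1 h2
      simp only [List.length_map, List.length_range] at h1
      simp only [List.getElem_map, List.getElem_range]
      by_cases hB : i < b.toList.length
      · rw [List.getElem_append_left
          (by simp only [List.length_map, List.length_zip]; omega),
          if_neg (by omega), if_neg (by omega)]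
        simp only [List.getElem_map, List.getElem_zip]
        rw [List.getD_eq_getElem a.toList ' ' (by omega), List.getD_eq_getElem b.toList ' ' hB]
      · rw [List.getElem_append_right
          (by simp only [List.length_map, List.length_zip]; omega),
          if_neg (by omega), if_pos (by omega)]
        simp only [List.length_map, List.length_zip, List.getElem_map, List.getElem_drop]
        have hj : b.toList.length + (i - min a.toList.length b.toList.length) = i := by omega
        simp only [hj]
        rw [List.getD_eq_getElem a.toList ' ' (by omega)]
  · simp only [if_neg hgt]
    apply List.ext_getElem
    · simp only [List.length_map, List.length_range, List.length_append, List.length_zip,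
        List.length_drop]
      omega
    · intro i h1 h2
      simp only [List.length_map, List.length_range] at h1
      simp only [List.getElem_map, List.getElem_range]
      by_cases hA : i < a.toList.length
      · rw [List.getElem_append_left
          (by simp only [List.length_map, List.length_zip]; omega),
          if_neg (by omega), if_neg (by omega)]
        simp only [List.getElem_map, List.getElem_zip]
        rw [List.getD_eq_getElem a.toList ' ' hA, List.getD_eq_getElem b.toList ' ' (by omega)]
      · rw [List.getElem_append_right
          (by simp only [List.length_map, List.length_zip]; omega),
          if_pos (by omega)]
        simp only [List.length_map, List.length_zip, List.getElem_map, List.getElem_drop]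
        have hj : a.toList.length + (i - min a.toList.length b.toList.length) = i := by omega
        simp only [hj]
        rw [List.getD_eq_getElem b.toList ' ' (by omega),
          show Nat.xor 187 (b.toList[i].toNat) = Nat.xor (b.toList[i].toNat) 187 from
            Nat.xor_comm _ _]

-- ===== VERDICT (by name: the statement is the Claim_ definition above) =====
theorem secEncode_spec : Claim_equal_secEncode := by
  intro a b c _ _
  unfold Spec_secEncode
  exact secEncode_lists a b c
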